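-- pv_equiv track=rewrite | github.com/jenl11/Social-Network | network.py | knows_everyone
-- ===== SOURCE A (Python) =====
-- def knows_everyone(network):
--     '''(2Dlist)->bool
--     Given a 2D-list for friendship network,
--     returns True if there is a user in the network who knows everyone
--     and False otherwise'''
--     user = []
--     for i in network:
--         user.append(i[0])
--
--     for j in network:
--         user.remove(j[0])
--         if j[1] == sorted(user):
--             return True
--
--     return False
-- ===== SOURCE B (Python) =====
-- def knows_everyone(network):
--     users = [row[0] for row in network]
--     for k, (_uid, friends) in enumerate(network):
--         if friends == sorted(users[k + 1:]):
--             return True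
--     return False
-- ===== Notes on version B (the rewrite author's own statement) =====
-- stated objective: simpler
-- what changed: Replaces A's cumulative stateful user.remove mutation across iterations with a stateless per-index check against the sorted suffix slice users[k+1:] of an id list built once.
import Mathlib
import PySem

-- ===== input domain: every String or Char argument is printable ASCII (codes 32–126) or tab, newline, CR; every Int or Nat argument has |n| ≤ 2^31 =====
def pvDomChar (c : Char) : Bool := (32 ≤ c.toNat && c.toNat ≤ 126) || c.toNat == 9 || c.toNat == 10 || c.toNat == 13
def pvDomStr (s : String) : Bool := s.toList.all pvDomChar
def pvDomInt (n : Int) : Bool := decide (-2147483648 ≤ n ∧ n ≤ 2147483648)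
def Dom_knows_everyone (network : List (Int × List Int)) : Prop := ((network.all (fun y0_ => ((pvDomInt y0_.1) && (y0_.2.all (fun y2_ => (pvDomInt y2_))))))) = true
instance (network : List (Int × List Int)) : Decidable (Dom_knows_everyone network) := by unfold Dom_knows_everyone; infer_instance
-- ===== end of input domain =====

-- B replaces A's cumulative `user.remove` mutation with a stateless check of each row's
-- friend list against the sorted suffix of an id list built once (objective: simpler).

-- ===== PORT A =====
-- second loop of A: state `user` is mutated by user.remove(j[0]) before each comparison
def pvGoA : List (Int × List Int) → List Int → Bool
  | [], _ => false
  | j :: rest, user =>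
    match PySem.List.remove? user j.1 with
    | none => false   -- Python would raise ValueError; unreachable: every j.1 was appended to user
    | some user' =>
      if j.2 = PySem.List.sorted user' (fun x => x) false then true
      else pvGoA rest user'

def knows_everyone (network : List (Int × List Int)) : Bool :=
  pvGoA network (network.foldl (fun user i => user ++ [i.1]) [])

-- ===== PORT B =====
def knows_everyone_alt (network : List (Int × List Int)) : Bool :=
  let users := network.map (fun row => row.1)
  (PySem.List.enumerate network 0).any (fun kr =>
    decide (kr.2.2 = PySem.List.sorted (PySem.List.slice users (some (kr.1 + 1)) none) (fun x => x) false))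

-- ===== PRECONDITION & SPEC =====
def Spec_knows_everyone (network : List (Int × List Int)) (out : Bool) : Prop := out = knows_everyone_alt network
instance (network : List (Int × List Int)) (out : Bool) : Decidable (Spec_knows_everyone network out) := by unfold Spec_knows_everyone; infer_instance

-- ===== CLAIM (what is proved, stated in full; the proofs are below) =====
def Claim_equal_knows_everyone : Prop := ∀ (network : List (Int × List Int)), Dom_knows_everyone network → Spec_knows_everyone network (knows_everyone network)

-- ===== LEMMAS AND PROOFS =====

-- common reference form of the scan
def pvGo : List (Int × List Int) → Bool
  | [] => false
  | j :: rest =>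
    decide (j.2 = PySem.List.sorted (rest.map Prod.fst) (fun x => x) false) || pvGo rest

lemma pv_foldl_app (l : List (Int × List Int)) (acc : List Int) :
    l.foldl (fun user i => user ++ [i.1]) acc = acc ++ l.map Prod.fst := by
  induction l generalizing acc with
  | nil => simp
  | cons j rest ih => simp [List.foldl_cons, ih]

lemma pv_goA_eq (l : List (Int × List Int)) :
    pvGoA l (l.map Prod.fst) = pvGo l := by
  induction l with
  | nil => rfl
  | cons j rest ih =>
    simp only [List.map_cons, pvGoA, PySem.List.remove?_cons_self, pvGo, ih]
    by_cases h : j.2 = PySem.List.sorted (rest.map Prod.fst) (fun x => x) false <;> simp [h]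

lemma pv_alt_eq (l : List (Int × List Int)) (full : List Int) (s : Nat)
    (h : full.drop s = l.map Prod.fst) :
    (PySem.List.enumerate l (s : Int)).any (fun kr =>
      decide (kr.2.2 = PySem.List.sorted (PySem.List.slice full (some (kr.1 + 1)) none) (fun x => x) false))
      = pvGo l := by
  induction l generalizing s with
  | nil => simp [PySem.List.enumerate_nil, pvGo]
  | cons j rest ih =>
    rw [PySem.List.enumerate_cons]
    have hs1 : ((s : Int) + 1) = ((s + 1 : Nat) : Int) := by push_cast; ring
    have hdrop : full.drop (s + 1) = rest.map Prod.fst := by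
      have : full.drop (s + 1) = (full.drop s).drop 1 := by
        rw [List.drop_drop]
      rw [this, h]; simp
    simp only [List.any_cons, hs1, PySem.List.slice_from_natCast, hdrop, pvGo]
    congr 1
    exact ih (s + 1) hdrop

-- ===== VERDICT (by name: the statement is the Claim_ definition above) =====
theorem knows_everyone_spec : Claim_equal_knows_everyone := by
  intro network _
  unfold Spec_knows_everyone knows_everyone knows_everyone_alt
  rw [pv_foldl_app, List.nil_append, pv_goA_eq]
  have := pv_alt_eq network (network.map Prod.fst) 0 (by simp)
  simpa using this.symm
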